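-- pv_equiv track=rewrite | github.com/turanyalin/MachineLearningHuggingFaceDataFetchingScript | Data-Models.py | categorize_model
-- ===== SOURCE A (Python) =====
-- def categorize_model(tags):
--     """
--     Categorizes the model based on its tags.
--     Returns a string representing the training data category.
--     """
--     if not tags:
--         return "Unknown"
--     tags_str = " ".join(tag.lower() for tag in tags)
--     if "math" in tags_str or "mathematics" in tags_str:
--         return "Mathematics"
--     elif "image" in tags_str or "vision" in tags_str:
--         return "Computer Vision"
--     elif "speech" in tags_str or "audio" in tags_str or "tts" in tags_str:
--         return "Speech"
--     elif "text" in tags_str: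
--         return "Natural Language Processing"
--     else:
--         return "Other"
-- ===== SOURCE B (Python) =====
-- KEYWORD_GROUPS = [
--     ["math", "mathematics"],
--     ["image", "vision"],
--     ["speech", "audio", "tts"],
--     ["text"],
-- ]
-- LABELS = ["Mathematics", "Computer Vision", "Speech", "Natural Language Processing", "Other"]
--
--
-- def _rank(low):
--     """Priority rank of one lowercased tag: index of the first keyword group it matches."""
--     for i, kws in enumerate(KEYWORD_GROUPS):
--         if any(kw in low for kw in kws):
--             return i
--     return len(KEYWORD_GROUPS)
--
--
-- def categorize_model(tags):
--     """
--     Categorizes the model based on its tags.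
--     Returns a string representing the training data category.
--     """
--     if not tags:
--         return "Unknown"
--     best = len(KEYWORD_GROUPS)
--     for tag in tags:
--         r = _rank(tag.lower())
--         if r < best:
--             best = r
--     return LABELS[best]
-- ===== Notes on version B (the rewrite author's own statement) =====
-- stated objective: alternative
-- what changed: B inverts the loop nesting: a single pass over the tags maintains a running minimum priority rank (each tag's rank = index of the first keyword group it matches) and finally indexes a label table by that minimum, instead of A's if/elif category ladder doing substring tests on one big joined string; equivalent because no keyword contains a space and the highest-priority matching category equals the minimum per-tag rank.
import Mathlib
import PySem

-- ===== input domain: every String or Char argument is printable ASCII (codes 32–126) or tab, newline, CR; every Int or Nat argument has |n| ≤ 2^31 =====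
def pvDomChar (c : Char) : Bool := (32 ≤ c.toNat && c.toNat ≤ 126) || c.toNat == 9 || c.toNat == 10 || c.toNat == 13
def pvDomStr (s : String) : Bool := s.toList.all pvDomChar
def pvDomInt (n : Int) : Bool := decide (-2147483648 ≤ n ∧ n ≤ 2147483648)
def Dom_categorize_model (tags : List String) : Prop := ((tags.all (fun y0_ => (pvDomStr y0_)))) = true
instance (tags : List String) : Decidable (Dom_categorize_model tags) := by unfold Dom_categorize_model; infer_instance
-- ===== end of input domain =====

-- B replaces A's joined-string if/elif ladder by a single pass over tags keeping a running minimum priority rank, then a label-table lookup (alternative decomposition, same cost).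


-- ===== PORT A =====
def categorize_model (tags : List String) : String :=
  if tags = [] then "Unknown"
  else
    let tags_str := PySem.Str.join " " (tags.map PySem.Str.lower)
    if PySem.Str.isIn "math" tags_str || PySem.Str.isIn "mathematics" tags_str then "Mathematics"
    else if PySem.Str.isIn "image" tags_str || PySem.Str.isIn "vision" tags_str then "Computer Vision"
    else if PySem.Str.isIn "speech" tags_str || PySem.Str.isIn "audio" tags_str || PySem.Str.isIn "tts" tags_str then "Speech"
    else if PySem.Str.isIn "text" tags_str then "Natural Language Processing"
    else "Other"

-- ===== PORT B =====
def pvKeywordGroups : List (List String) :=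
  [["math", "mathematics"], ["image", "vision"], ["speech", "audio", "tts"], ["text"]]

def pvLabels : List String :=
  ["Mathematics", "Computer Vision", "Speech", "Natural Language Processing", "Other"]

-- _rank: index of the first keyword group matching the lowercased tag (= len if none)
def pvRank (low : String) : Nat :=
  pvKeywordGroups.findIdx (fun kws => kws.any (fun kw => PySem.Str.isIn kw low))

def categorize_model_alt (tags : List String) : String :=
  if tags = [] then "Unknown"
  else
    let best := tags.foldl
      (fun best tag =>
        let r := pvRank (PySem.Str.lower tag)
        if r < best then r else best) pvKeywordGroups.length
    pvLabels.getD best ""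

-- ===== PRECONDITION & SPEC =====
def Spec_categorize_model (tags : List String) (out : String) : Prop := out = categorize_model_alt tags
instance (tags : List String) (out : String) : Decidable (Spec_categorize_model tags out) := by unfold Spec_categorize_model; infer_instance

-- ===== CLAIM (what is proved, stated in full; the proofs are below) =====
def Claim_equal_categorize_model : Prop := ∀ (tags : List String), Dom_categorize_model tags → Spec_categorize_model tags (categorize_model tags)

-- ===== LEMMAS AND PROOFS =====

-- a space-free prefix of a ++ c :: b is a prefix of a
theorem pv_prefix_append_cons {k a b : List Char} {c : Char} (hc : c ∉ k)
    (h : k <+: a ++ c :: b) : k <+: a := by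
  have hlen : k.length ≤ a.length := by
    by_contra hgt
    have hi : a.length < k.length := by omega
    have hget := h.getElem (i := a.length) hi
    have hc' : (a ++ c :: b)[a.length]'(by simp) = c := by
      simp
    exact hc ((hget.trans hc') ▸ List.getElem_mem hi)
  exact List.prefix_of_prefix_length_le h (List.prefix_append a (c :: b)) (by simpa using hlen)

-- a space-free infix of a ++ c :: b lies in a or in b
theorem pv_infix_append_cons {k : List Char} {c : Char} (hc : c ∉ k) (a b : List Char) :
    k <:+: a ++ c :: b ↔ (k <:+: a ∨ k <:+: b) := by
  constructor
  · intro h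
    induction a with
    | nil =>
      simp only [List.nil_append, List.infix_cons_iff] at h
      rcases h with h | h
      · rcases h with ⟨t, ht⟩
        cases k with
        | nil => exact Or.inl List.nil_infix
        | cons x k' =>
          cases ht
          exact absurd (List.mem_cons_self) hc
      · exact Or.inr h
    | cons x a' ih =>
      rw [List.cons_append, List.infix_cons_iff] at h
      rcases h with h | h
      · left
        cases k with
        | nil => exact List.nil_infix
        | cons y k' =>
          rcases h with ⟨t, ht⟩
          injection ht with hxy ht'
          have hck' : c ∉ k' := fun hm => hc (List.mem_cons_of_mem _ hm)
          have hp : k' <+: a' ++ c :: b := ⟨t, ht'⟩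
          have hp' := pv_prefix_append_cons hck' hp
          exact (List.cons_prefix_cons.mpr ⟨hxy, hp'⟩).isInfix
      · rcases ih h with h' | h'
        · exact Or.inl (h'.trans (List.suffix_cons x a').isInfix)
        · exact Or.inr h'
  · rintro (h | h)
    · exact h.trans ⟨[], c :: b, by simp⟩
    · exact h.trans ⟨a ++ [c], [], by simp⟩

-- a space-free infix of " ".join(ps) (ps nonempty) is an infix of some piece
theorem pv_infix_join {k : List Char} (hc : (' ' : Char) ∉ k) :
    ∀ (ps : List (List Char)), ps ≠ [] →
      (k <:+: PySem.Chars.join [' '] ps ↔ ∃ p ∈ ps, k <:+: p) := by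
  intro ps
  induction ps with
  | nil => intro h; exact absurd rfl h
  | cons p ps' ih =>
    intro _
    cases ps' with
    | nil => simp [PySem.Chars.join, List.intercalate]
    | cons q rest =>
      rw [PySem.Chars.join_cons_cons, List.append_assoc, List.singleton_append,
        pv_infix_append_cons hc, ih (by simp)]
      simp only [List.mem_cons]
      constructor
      · rintro (h | ⟨x, hx, hkx⟩)
        · exact ⟨p, Or.inl rfl, h⟩
        · exact ⟨x, Or.inr hx, hkx⟩
      · rintro ⟨x, rfl | hx, hkx⟩
        · exact Or.inl hkx
        · exact Or.inr ⟨x, hx, hkx⟩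

-- substring-of-joined-lowered-tags = substring of some lowered tag, for a space-free keyword
theorem pv_isIn_join (kw : String) (hc : (' ' : Char) ∉ kw.toList) (tags : List String)
    (hne : tags ≠ []) :
    PySem.Str.isIn kw (PySem.Str.join " " (tags.map PySem.Str.lower)) =
      tags.any (fun t => PySem.Str.isIn kw (PySem.Str.lower t)) := by
  rw [Bool.eq_iff_iff, PySem.Str.isIn_iff_infix, PySem.Str.toList_join]
  have hmapne : (tags.map PySem.Str.lower).map String.toList ≠ [] := by
    simp [hne]
  have hsep : (" " : String).toList = [' '] := rfl
  rw [hsep, pv_infix_join hc _ hmapne]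
  simp only [List.map_map, List.mem_map, Function.comp, List.any_eq_true,
    PySem.Str.isIn_iff_infix]
  constructor
  · rintro ⟨_, ⟨t, ht, rfl⟩, hk⟩
    exact ⟨t, ht, hk⟩
  · rintro ⟨t, ht, hk⟩
    exact ⟨_, ⟨t, ht, rfl⟩, hk⟩

-- nested-if form of the four-way ladder over four booleans
def pvLadder (q0 q1 q2 q3 : Bool) : Nat :=
  if q0 then 0 else if q1 then 1 else if q2 then 2 else if q3 then 3 else 4

-- whether lowered tag t matches keyword group i
def pvM (t : String) (kws : List String) : Bool :=
  kws.any (fun kw => PySem.Str.isIn kw (PySem.Str.lower t))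

theorem pv_findIdx4 {A : Type} (p : A → Bool) (g0 g1 g2 g3 : A) :
    List.findIdx p [g0, g1, g2, g3] = pvLadder (p g0) (p g1) (p g2) (p g3) := by
  simp only [List.findIdx_cons, pvLadder]
  cases p g0 <;> cases p g1 <;> cases p g2 <;> cases p g3 <;> rfl

theorem pv_rank_eq (t : String) :
    pvRank (PySem.Str.lower t) =
      pvLadder (pvM t ["math", "mathematics"]) (pvM t ["image", "vision"])
        (pvM t ["speech", "audio", "tts"]) (pvM t ["text"]) := by
  simp only [pvRank, pvKeywordGroups]
  exact pv_findIdx4 _ _ _ _ _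

theorem pv_ladder_or (a0 a1 a2 a3 b0 b1 b2 b3 : Bool) :
    pvLadder (a0 || b0) (a1 || b1) (a2 || b2) (a3 || b3) =
      min (pvLadder a0 a1 a2 a3) (pvLadder b0 b1 b2 b3) := by
  revert a0 a1 a2 a3 b0 b1 b2 b3; decide

-- the fold computes min of the initial value (≤ 4) with the ladder of the group anys
theorem pv_fold_min (tags : List String) : ∀ b : Nat, b ≤ 4 →
    tags.foldl
      (fun best tag =>
        let r := pvRank (PySem.Str.lower tag)
        if r < best then r else best) b
    = min b
        (pvLadder (tags.any (fun t => pvM t ["math", "mathematics"]))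
          (tags.any (fun t => pvM t ["image", "vision"]))
          (tags.any (fun t => pvM t ["speech", "audio", "tts"]))
          (tags.any (fun t => pvM t ["text"]))) := by
  induction tags with
  | nil =>
    intro b hb
    simp only [List.foldl_nil, List.any_nil]
    have h4 : pvLadder false false false false = 4 := rfl
    rw [h4]
    omega
  | cons t ts ih =>
    intro b hb
    have hr : pvRank (PySem.Str.lower t) ≤ 4 := by
      rw [pv_rank_eq]
      unfold pvLadder
      split_ifs <;> omega
    have hif : (if pvRank (PySem.Str.lower t) < b then pvRank (PySem.Str.lower t) else b)
        = min b (pvRank (PySem.Str.lower t)) := by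
      rw [Nat.min_def]; split_ifs <;> omega
    simp only [List.foldl_cons]
    rw [hif, ih _ (le_trans (min_le_right _ _) hr)]
    simp only [List.any_cons]
    rw [pv_ladder_or, pv_rank_eq, min_assoc]

-- group-any splits into per-keyword anys
theorem pv_any_group (tags : List String) (kws : List String) :
    tags.any (fun t => pvM t kws) =
      kws.any (fun kw => tags.any (fun t => PySem.Str.isIn kw (PySem.Str.lower t))) := by
  rw [Bool.eq_iff_iff]
  simp only [List.any_eq_true, pvM]
  tauto

-- ===== VERDICT (by name: the statement is the Claim_ definition above) =====
theorem categorize_model_spec : Claim_equal_categorize_model := by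
  intro tags _
  unfold Spec_categorize_model categorize_model categorize_model_alt
  by_cases hne : tags = []
  · simp [hne]
  · simp only [hne, if_false]
    rw [pv_isIn_join "math" (by decide) tags hne,
        pv_isIn_join "mathematics" (by decide) tags hne,
        pv_isIn_join "image" (by decide) tags hne,
        pv_isIn_join "vision" (by decide) tags hne,
        pv_isIn_join "speech" (by decide) tags hne,
        pv_isIn_join "audio" (by decide) tags hne,
        pv_isIn_join "tts" (by decide) tags hne,
        pv_isIn_join "text" (by decide) tags hne]
    have hlen : pvKeywordGroups.length = 4 := rfl
    rw [hlen, pv_fold_min tags 4 (by omega),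
        pv_any_group tags ["math", "mathematics"],
        pv_any_group tags ["image", "vision"],
        pv_any_group tags ["speech", "audio", "tts"],
        pv_any_group tags ["text"]]
    simp only [List.any_cons, List.any_nil, Bool.or_false]
    cases h1 : tags.any (fun t => PySem.Str.isIn "math" (PySem.Str.lower t)) <;>
    cases h2 : tags.any (fun t => PySem.Str.isIn "mathematics" (PySem.Str.lower t)) <;>
    cases h3 : tags.any (fun t => PySem.Str.isIn "image" (PySem.Str.lower t)) <;>
    cases h4 : tags.any (fun t => PySem.Str.isIn "vision" (PySem.Str.lower t)) <;>
    cases h5 : tags.any (fun t => PySem.Str.isIn "speech" (PySem.Str.lower t)) <;>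
    cases h6 : tags.any (fun t => PySem.Str.isIn "audio" (PySem.Str.lower t)) <;>
    cases h7 : tags.any (fun t => PySem.Str.isIn "tts" (PySem.Str.lower t)) <;>
    cases h8 : tags.any (fun t => PySem.Str.isIn "text" (PySem.Str.lower t)) <;>
    rfl
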